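-- pv_equiv track=rewrite | github.com/fajardogomez/dowgraphs | dow.py | order_chars
-- ===== SOURCE A (Python) =====
-- def order_chars(char_list):
--     """
--     Order the symbols in the list, integers before letters, and upper case
--     letters before lower case letters.
--     """
--     integers = list()
--     letters = list()
--     for x in char_list:
--         if x.isdigit():
--             integers.append(int(x))
--         elif x.isalpha():
--             letters.append(x)
--     return [str(x) for x in sorted(integers)] + sorted(letters)
-- ===== SOURCE B (Python) =====
-- def order_chars(char_list):
--     """
--     Order the symbols in the list, integers before letters, and upper case
--     letters before lower case letters.
--     """
--     keyed = []
--     for x in char_list: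
--         if x.isdigit():
--             keyed.append((0, int(x), ""))
--         elif x.isalpha():
--             keyed.append((1, 0, x))
--     keyed.sort()
--     return [str(t[1]) if t[0] == 0 else t[2] for t in keyed]
-- ===== Notes on version B (the rewrite author's own statement) =====
-- stated objective: alternative
-- what changed: Replaces the two separately collected and separately sorted buckets by a single decorated list of homogeneous (tag, int, str) tuples sorted once; the leading 0/1 tag keeps integers before letters and the mapping back undecorates.
import Mathlib
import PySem

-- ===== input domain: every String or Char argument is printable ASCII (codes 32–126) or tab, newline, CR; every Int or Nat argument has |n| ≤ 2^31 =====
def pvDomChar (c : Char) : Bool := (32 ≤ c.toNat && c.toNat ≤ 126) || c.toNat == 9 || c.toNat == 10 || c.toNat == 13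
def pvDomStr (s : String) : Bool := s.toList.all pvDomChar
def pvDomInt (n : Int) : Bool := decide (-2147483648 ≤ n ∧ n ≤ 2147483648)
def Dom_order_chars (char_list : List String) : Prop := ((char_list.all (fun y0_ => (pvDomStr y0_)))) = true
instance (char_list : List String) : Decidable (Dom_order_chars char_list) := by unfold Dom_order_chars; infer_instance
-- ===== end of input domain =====

-- B replaces A's two separately sorted buckets by ONE sort of a (tag, int, str)-decorated list; alternative decomposition, same cost.


-- ===== PORT A =====
-- loop body of A: append int(x) to integers if x.isdigit(), else x to letters if x.isalpha()
-- (int(x) is guarded by isdigit, so PySem.Int.ofStr? always returns some there; .getD 0 only totalizes)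
def stepA (acc : List Int × List String) (x : String) : List Int × List String :=
  if PySem.Str.strIsdigit x then (acc.1 ++ [(PySem.Int.ofStr? x).getD 0], acc.2)
  else if PySem.Str.strIsalpha x then (acc.1, acc.2 ++ [x])
  else acc

def order_chars (char_list : List String) : List String :=
  let p := char_list.foldl stepA ([], [])
  (PySem.List.sorted p.1 (fun x => x) false).map PySem.Int.toStr
    ++ PySem.List.sorted p.2 (fun x => x) false

-- ===== PORT B =====
-- Python's lexicographic order on homogeneous (int, int, str) 3-tuples
def ocKey (t : Int × Int × String) : Lex (Int × Lex (Int × String)) :=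
  toLex (t.1, toLex (t.2.1, t.2.2))

-- loop body of B: decorate each kept element with a (tag, int, str) tuple
def stepB (acc : List (Int × Int × String)) (x : String) : List (Int × Int × String) :=
  if PySem.Str.strIsdigit x then acc ++ [(0, (PySem.Int.ofStr? x).getD 0, "")]
  else if PySem.Str.strIsalpha x then acc ++ [(1, 0, x)]
  else acc

def order_chars_alt (char_list : List String) : List String :=
  let keyed := char_list.foldl stepB []
  (PySem.List.sorted keyed ocKey false).map
    (fun t => if t.1 == 0 then PySem.Int.toStr t.2.1 else t.2.2)

-- ===== PRECONDITION & SPEC =====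
def Spec_order_chars (char_list : List String) (out : List String) : Prop := out = order_chars_alt char_list
instance (char_list : List String) (out : List String) : Decidable (Spec_order_chars char_list out) := by unfold Spec_order_chars; infer_instance

-- ===== CLAIM (what is proved, stated in full; the proofs are below) =====
def Claim_equal_order_chars : Prop := ∀ (char_list : List String), Dom_order_chars char_list → Spec_order_chars char_list (order_chars char_list)

-- ===== LEMMAS AND PROOFS =====

-- decorations
def ddp (n : Int) : Int × Int × String := (0, n, "")
def dlp (s : String) : Int × Int × String := (1, 0, s)

-- comparators used by the insertion-sort characterization of PySem.List.sorted
def bK (a b : Int × Int × String) : Bool := decide (ocKey a < ocKey b)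
def bI (a b : Int) : Bool := decide (a < b)
def bS (a b : String) : Bool := decide (a < b)

lemma bK_dd_dd (n m : Int) : bK (ddp n) (ddp m) = bI n m := by
  simp [bK, bI, ddp, ocKey, Prod.Lex.toLex_lt_toLex]

lemma bK_dd_dl (n : Int) (s : String) : bK (ddp n) (dlp s) = true := by
  simp [bK, ddp, dlp, ocKey, Prod.Lex.toLex_lt_toLex]

lemma bK_dl_dd (s : String) (n : Int) : bK (dlp s) (ddp n) = false := by
  simp [bK, ddp, dlp, ocKey, Prod.Lex.toLex_lt_toLex]

lemma bK_dl_dl (s t : String) : bK (dlp s) (dlp t) = bS s t := by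
  simp [bK, bS, dlp, ocKey, Prod.Lex.toLex_lt_toLex]

-- inserting a decorated digit goes into the digit block, leaving the letter block untouched
lemma insert_dd (n : Int) (A : List Int) (L : List String) :
    PySem.List.insertBy bK (ddp n) (A.map ddp ++ L.map dlp)
      = (PySem.List.insertBy bI n A).map ddp ++ L.map dlp := by
  induction A with
  | nil =>
      cases L with
      | nil => simp [PySem.List.insertBy]
      | cons s L' => simp [PySem.List.insertBy, bK_dd_dl]
  | cons m A ih =>
      simp only [List.map_cons, List.cons_append, PySem.List.insertBy, bK_dd_dd]
      cases h : bI n m <;> simp [ih]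

-- inserting a decorated letter passes the digit block and goes into the letter block
lemma insert_dl_letters (s : String) (L : List String) :
    PySem.List.insertBy bK (dlp s) (L.map dlp)
      = (PySem.List.insertBy bS s L).map dlp := by
  induction L with
  | nil => simp [PySem.List.insertBy]
  | cons t L ih =>
      simp only [List.map_cons, PySem.List.insertBy, bK_dl_dl]
      cases h : bS s t <;> simp [ih]

lemma insert_dl (s : String) (A : List Int) (L : List String) :
    PySem.List.insertBy bK (dlp s) (A.map ddp ++ L.map dlp)
      = A.map ddp ++ (PySem.List.insertBy bS s L).map dlp := by
  induction A with
  | nil => simpa using insert_dl_letters s L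
  | cons m A ih =>
      simp only [List.map_cons, List.cons_append, PySem.List.insertBy, bK_dl_dd]
      simp [ih]

-- the element each x contributes, per side
def encI (x : String) : Option Int :=
  if PySem.Str.strIsdigit x then some ((PySem.Int.ofStr? x).getD 0) else none
def encS (x : String) : Option String :=
  if PySem.Str.strIsdigit x then none
  else if PySem.Str.strIsalpha x then some x else none
def encK (x : String) : Option (Int × Int × String) :=
  if PySem.Str.strIsdigit x then some (ddp ((PySem.Int.ofStr? x).getD 0))
  else if PySem.Str.strIsalpha x then some (dlp x) else none

-- A's accumulating loop is the pair of filterMaps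
lemma foldA_eq (l : List String) (acc : List Int × List String) :
    l.foldl stepA acc = (acc.1 ++ l.filterMap encI, acc.2 ++ l.filterMap encS) := by
  induction l generalizing acc with
  | nil => simp
  | cons x l ih =>
      simp only [List.foldl_cons, ih, stepA, encI, encS, List.filterMap_cons]
      split_ifs <;> simp

-- B's decorating loop is a filterMap
lemma foldB_eq (l : List String) (acc : List (Int × Int × String)) :
    l.foldl stepB acc = acc ++ l.filterMap encK := by
  induction l generalizing acc with
  | nil => simp
  | cons x l ih =>
      simp only [List.foldl_cons, ih, stepB, encK, ddp, dlp, List.filterMap_cons]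
      split_ifs <;> simp

-- the single insertion sort of the decorated list is the two insertion sorts, blockwise
lemma main_fold (l : List String) (A : List Int) (L : List String) :
    (l.filterMap encK).foldl (fun acc t => PySem.List.insertBy bK t acc) (A.map ddp ++ L.map dlp)
      = ((l.filterMap encI).foldl (fun acc n => PySem.List.insertBy bI n acc) A).map ddp
        ++ ((l.filterMap encS).foldl (fun acc s => PySem.List.insertBy bS s acc) L).map dlp := by
  induction l generalizing A L with
  | nil => simp
  | cons x l ih =>
      simp only [encK, encI, encS, List.filterMap_cons]
      split_ifs with h1 h2
      · simp only [List.foldl_cons, insert_dd]; exact ih _ _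
      · simp only [List.foldl_cons, insert_dl]; exact ih _ _
      · exact ih _ _

-- ===== VERDICT (by name: the statement is the Claim_ definition above) =====
theorem order_chars_spec : Claim_equal_order_chars := by
  intro char_list _
  show order_chars char_list = order_chars_alt char_list
  have hA := foldA_eq char_list ([], [])
  have hB := foldB_eq char_list []
  simp only [order_chars, order_chars_alt, hA, hB, List.nil_append,
    PySem.List.sorted_eq_foldl_insertBy]
  have hmain := main_fold char_list [] []
  simp only [List.map_nil, List.nil_append] at hmain
  rw [show (fun (a b : Int × Int × String) => decide (ocKey a < ocKey b)) = bK from rfl,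
      show (fun (a b : Int) => decide (a < b)) = bI from rfl,
      show (fun (a b : String) => decide (a < b)) = bS from rfl, hmain]
  have h1 : ((fun (t : Int × Int × String) => if t.1 == 0 then PySem.Int.toStr t.2.1 else t.2.2) ∘ ddp)
      = PySem.Int.toStr := by funext n; simp [ddp]
  have h2 : ((fun (t : Int × Int × String) => if t.1 == 0 then PySem.Int.toStr t.2.1 else t.2.2) ∘ dlp)
      = id := by funext s; simp [dlp]
  rw [List.map_append, List.map_map, List.map_map, h1, h2, List.map_id]
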